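-- pv_equiv track=rewrite | github.com/GregoryChaseJohnson/red_pen | renderer/run/align_overhang.py | identify_red_blocks
-- ===== SOURCE A (Python) =====
-- def identify_red_blocks(final_sentence):
--     """
--     Identify red blocks allowing a single space inside the block.
--     Red tokens define a block. A single space is allowed within a block.
--     More than one consecutive space or a non-red, non-space token ends the block.
--     """
--     def is_red(token):
--         return token.get('type', 'equal') == 'replace'
--     def is_space_char(token):
--         return token['char'].isspace()
--
--     def add_block(blocks, start, end):
--         if start is not None and end is not None and end >= start:
--             blocks.append({'block_start': start, 'block_end': end})
--
--     blocks = []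
--     block_start = None
--     space_count = 0
--
--     for idx, token in enumerate(final_sentence):
--         if is_red(token):
--             if block_start is None:
--                 block_start = idx
--             space_count = 0
--         elif is_space_char(token):
--             space_count += 1
--             if space_count > 1:
--                 # More than one consecutive space ends the block
--                 add_block(blocks, block_start, idx - space_count)
--                 block_start = None
--                 space_count = 0
--         else:
--             # Non-red, non-space ends the block
--             add_block(blocks, block_start, idx - 1 - space_count)
--             block_start = None
--             space_count = 0
--
--     # Close any remaining block
--     add_block(blocks, block_start, len(final_sentence) - 1 - space_count)
--
--     return blocks
-- ===== SOURCE B (Python) =====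
-- def identify_red_blocks(final_sentence):
--     # Two-phase: classify every token once into 'R'/'S'/'O', then scan the
--     # class sequence with an explicit block scanner using one-token lookahead.
--     cls = ['R' if t.get('type', 'equal') == 'replace'
--            else ('S' if t['char'].isspace() else 'O')
--            for t in final_sentence]
--     n = len(cls)
--     blocks = []
--     i = 0
--     while i < n:
--         if cls[i] != 'R':
--             i += 1
--             continue
--         start = i
--         end = i
--         i += 1
--         while i < n:
--             if cls[i] == 'R':
--                 end = i
--                 i += 1
--             elif cls[i] == 'S' and i + 1 < n and cls[i + 1] == 'R':
--                 end = i + 1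
--                 i += 2
--             else:
--                 i += 1
--                 break
--         blocks.append({'block_start': start, 'block_end': end})
--     return blocks
-- ===== Notes on version B (the rewrite author's own statement) =====
-- stated objective: alternative
-- what changed: Replaces A's single pass with block_start/space_count counter state by a two-phase algorithm: one classification pass mapping each token to 'R'/'S'/'O', then an explicit block scanner over the class sequence with one-token lookahead for a single internal space.
import Mathlib
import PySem

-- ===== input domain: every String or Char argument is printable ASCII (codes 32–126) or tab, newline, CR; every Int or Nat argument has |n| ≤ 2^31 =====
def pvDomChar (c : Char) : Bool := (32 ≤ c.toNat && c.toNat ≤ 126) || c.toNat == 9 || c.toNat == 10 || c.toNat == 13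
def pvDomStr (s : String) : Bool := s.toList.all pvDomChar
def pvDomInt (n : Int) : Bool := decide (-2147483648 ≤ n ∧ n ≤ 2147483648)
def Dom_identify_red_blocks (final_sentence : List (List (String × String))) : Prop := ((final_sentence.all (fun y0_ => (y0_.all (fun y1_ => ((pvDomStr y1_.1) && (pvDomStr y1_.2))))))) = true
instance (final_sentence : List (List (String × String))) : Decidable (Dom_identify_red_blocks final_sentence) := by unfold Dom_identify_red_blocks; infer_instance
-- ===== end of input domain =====

-- B classifies every token once into 'R'/'S'/'O' and scans the class sequence with one-token
-- lookahead, instead of A's single state machine with block_start/space_count counters.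
-- Tokens are dicts rendered as association lists; lookup is first match (exact for a Python dict's items).

-- ===== PORT A =====
-- token.get(k, dflt): first-match lookup with default (exact for a dict's items)
def pvGetTok (t : List (String × String)) (k : String) (dflt : String) : String :=
  match t.find? (fun p => p.1 == k) with
  | some p => p.2
  | none => dflt

def pvIsRed (t : List (String × String)) : Bool :=
  pvGetTok t "type" "equal" == "replace"

-- token['char'].isspace(); token['char'] raises KeyError when absent — excluded by Pre_,
-- so the default "" is never looked at on admitted inputs
def pvIsSpace (t : List (String × String)) : Bool :=
  PySem.Str.strIsspace (pvGetTok t "char" "")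

def pvMkBlock (s e : Int) : List (String × Int) :=
  [("block_start", s), ("block_end", e)]

def pvAddBlock (blocks : List (List (String × Int))) (start : Option Int) (e : Int) :
    List (List (String × Int)) :=
  match start with
  | none => blocks
  | some s => if e ≥ s then blocks ++ [pvMkBlock s e] else blocks

-- the for-loop of A carrying (blocks, block_start, space_count); when the list is exhausted
-- idx = len(final_sentence), so the closing add_block uses idx - 1 - sc
def pvLoopA : List (List (String × String)) → Int → List (List (String × Int)) →
    Option Int → Int → List (List (String × Int))
  | [], idx, blocks, bs, sc => pvAddBlock blocks bs (idx - 1 - sc)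
  | t :: rest, idx, blocks, bs, sc =>
    if pvIsRed t then
      pvLoopA rest (idx + 1) blocks (some (bs.getD idx)) 0
    else if pvIsSpace t then
      if sc + 1 > 1 then pvLoopA rest (idx + 1) (pvAddBlock blocks bs (idx - (sc + 1))) none 0
      else pvLoopA rest (idx + 1) blocks bs (sc + 1)
    else
      pvLoopA rest (idx + 1) (pvAddBlock blocks bs (idx - 1 - sc)) none 0

def identify_red_blocks (final_sentence : List (List (String × String))) : List (List (String × Int)) :=
  pvLoopA final_sentence 0 [] none 0

-- ===== PORT B =====
def pvClassOf (t : List (String × String)) : Char :=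
  if pvGetTok t "type" "equal" == "replace" then 'R'
  else if PySem.Str.strIsspace (pvGetTok t "char" "") then 'S'
  else 'O'

mutual
-- outer while loop of B: looking for the next 'R'
def pvScanOut : List Char → Int → List (List (String × Int))
  | [], _ => []
  | c :: rest, i =>
    if c = 'R' then pvScanIn rest (i + 1) i i
    else pvScanOut rest (i + 1)
  termination_by l _ => l.length

-- inner while loop of B: inside a block started at s, last red seen at e;
-- on break Source B steps past the current (non-red) class and returns to the outer loop
def pvScanIn : List Char → Int → Int → Int → List (List (String × Int))
  | [], _, s, e => [pvMkBlock s e]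
  | c :: rest, i, s, e =>
    if c = 'R' then pvScanIn rest (i + 1) s i
    else if c = 'S' ∧ rest.head? = some 'R' then pvScanIn rest.tail (i + 2) s (i + 1)
    else pvMkBlock s e :: pvScanOut rest (i + 1)
  termination_by l _ _ _ => l.length
  decreasing_by all_goals (simp [List.length_tail]; try omega)
end

def identify_red_blocks_alt (final_sentence : List (List (String × String))) : List (List (String × Int)) :=
  pvScanOut (final_sentence.map pvClassOf) 0

-- ===== PRECONDITION & SPEC =====
-- Pre_ excludes only the inputs where A raises KeyError: a non-red token without a 'char' key.
def Pre_identify_red_blocks (final_sentence : List (List (String × String))) : Prop :=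
  ∀ t ∈ final_sentence, pvIsRed t = true ∨ (t.find? (fun p => p.1 == "char")).isSome = true
instance (final_sentence : List (List (String × String))) : Decidable (Pre_identify_red_blocks final_sentence) := by unfold Pre_identify_red_blocks; infer_instance

def pvWitness_identify_red_blocks : (List (List (String × String))) :=
  [[("type", "replace"), ("char", "a")], [("char", " ")], [("type", "replace"), ("char", "b")], [("char", ".")]]

def Spec_identify_red_blocks (final_sentence : List (List (String × String))) (out : List (List (String × Int))) : Prop := out = identify_red_blocks_alt final_sentence
instance (final_sentence : List (List (String × String))) (out : List (List (String × Int))) : Decidable (Spec_identify_red_blocks final_sentence out) := by unfold Spec_identify_red_blocks; infer_instance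

-- ===== CLAIM (what is proved, stated in full; the proofs are below) =====
def Claim_equal_identify_red_blocks : Prop := ∀ (final_sentence : List (List (String × String))), Dom_identify_red_blocks final_sentence → Pre_identify_red_blocks final_sentence → Spec_identify_red_blocks final_sentence (identify_red_blocks final_sentence)

-- ===== LEMMAS AND PROOFS =====

theorem pvScanOut_nil (i : Int) : pvScanOut [] i = [] := by
  rw [pvScanOut.eq_def]

theorem pvScanOut_cons (c : Char) (rest : List Char) (i : Int) :
    pvScanOut (c :: rest) i =
      if c = 'R' then pvScanIn rest (i + 1) i i else pvScanOut rest (i + 1) := by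
  rw [pvScanOut.eq_def]

theorem pvScanIn_nil (i s e : Int) : pvScanIn [] i s e = [pvMkBlock s e] := by
  rw [pvScanIn.eq_def]

theorem pvScanIn_cons (c : Char) (rest : List Char) (i s e : Int) :
    pvScanIn (c :: rest) i s e =
      if c = 'R' then pvScanIn rest (i + 1) s i
      else if c = 'S' ∧ rest.head? = some 'R' then pvScanIn rest.tail (i + 2) s (i + 1)
      else pvMkBlock s e :: pvScanOut rest (i + 1) := by
  rw [pvScanIn.eq_def]

-- joint loop invariant relating A's three reachable state shapes to B's scanners:
-- closed state (any space_count), open state with 0 pending spaces, open state with 1 pending space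
theorem pvLoop_inv :
    ∀ (l : List (List (String × String))) (i : Int) (blocks : List (List (String × Int))),
      (∀ sc : Int, pvLoopA l i blocks none sc = blocks ++ pvScanOut (l.map pvClassOf) i) ∧
      (∀ s : Int, s ≤ i - 1 →
        pvLoopA l i blocks (some s) 0 = blocks ++ pvScanIn (l.map pvClassOf) i s (i - 1)) ∧
      (∀ s : Int, s ≤ i - 2 →
        pvLoopA l i blocks (some s) 1 = blocks ++ pvScanIn ('S' :: l.map pvClassOf) (i - 1) s (i - 2)) := by
  intro l
  have hSR : ¬ ('S' : Char) = 'R' := by decide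
  induction l with
  | nil =>
    intro i blocks
    refine ⟨fun sc => ?_, fun s hs => ?_, fun s hs => ?_⟩
    · simp [pvLoopA, pvAddBlock, pvScanOut_nil]
    · rw [List.map_nil, pvScanIn_nil]
      simp only [pvLoopA, pvAddBlock]
      rw [if_pos (by omega : i - 1 - 0 ≥ s)]
      have h0 : i - 1 - 0 = i - 1 := by omega
      rw [h0]
    · rw [List.map_nil, pvScanIn_cons, if_neg hSR,
        if_neg (by simp : ¬ (('S' : Char) = 'S' ∧ ([] : List Char).head? = some 'R'))]
      simp only [pvLoopA, pvAddBlock]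
      rw [if_pos (by omega : i - 1 - 1 ≥ s)]
      have h1 : i - 1 - 1 = i - 2 := by omega
      have h2 : i - 1 + 1 = i := by omega
      rw [h1, h2, pvScanOut_nil]
  | cons t rest ih =>
    intro i blocks
    by_cases hr : pvIsRed t = true
    · -- class 'R'
      have hc : pvClassOf t = 'R' := by
        simp [pvClassOf, pvIsRed] at hr ⊢; simp [hr]
      refine ⟨fun sc => ?_, fun s hs => ?_, fun s hs => ?_⟩
      · simp only [pvLoopA, hr, if_true, Option.getD_none]
        rw [(ih (i + 1) blocks).2.1 i (by omega)]
        rw [List.map_cons, hc, pvScanOut_cons, if_pos rfl]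
        have h0 : i + 1 - 1 = i := by omega
        rw [h0]
      · simp only [pvLoopA, hr, if_true, Option.getD_some]
        rw [(ih (i + 1) blocks).2.1 s (by omega)]
        rw [List.map_cons, hc, pvScanIn_cons, if_pos rfl]
        have h0 : i + 1 - 1 = i := by omega
        rw [h0]
      · simp only [pvLoopA, hr, if_true, Option.getD_some]
        rw [(ih (i + 1) blocks).2.1 s (by omega)]
        rw [List.map_cons, hc, pvScanIn_cons, if_neg hSR,
          if_pos (⟨rfl, by simp⟩ : ('S' : Char) = 'S' ∧ ('R' :: List.map pvClassOf rest).head? = some 'R')]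
        have h1 : i - 1 + 2 = i + 1 := by omega
        have h2 : i - 1 + 1 = i := by omega
        have h0 : i + 1 - 1 = i := by omega
        rw [h1, h2, h0, List.tail_cons]
    · by_cases hsp : pvIsSpace t = true
      · -- class 'S'
        have hc : pvClassOf t = 'S' := by
          simp [pvClassOf, pvIsRed] at hr ⊢
          simp [pvIsSpace] at hsp
          simp [hr, hsp]
        refine ⟨fun sc => ?_, fun s hs => ?_, fun s hs => ?_⟩
        · rw [List.map_cons, hc, pvScanOut_cons, if_neg hSR]
          by_cases h1 : sc + 1 > 1
          · simp only [pvLoopA, hr, hsp, Bool.false_eq_true, if_false, if_true, if_pos h1,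
              pvAddBlock]
            exact (ih (i + 1) blocks).1 0
          · simp only [pvLoopA, hr, hsp, Bool.false_eq_true, if_false, if_true, if_neg h1]
            exact (ih (i + 1) blocks).1 (sc + 1)
        · simp only [pvLoopA, hr, hsp, Bool.false_eq_true, if_false, if_true]
          rw [if_neg (by omega : ¬ ((0 : Int) + 1 > 1))]
          have h01 : (0 : Int) + 1 = 1 := by omega
          rw [h01, (ih (i + 1) blocks).2.2 s (by omega)]
          have h2 : i + 1 - 1 = i := by omega
          have h3 : i + 1 - 2 = i - 1 := by omega
          rw [List.map_cons, hc, h2, h3]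
        · simp only [pvLoopA, hr, hsp, Bool.false_eq_true, if_false, if_true]
          rw [if_pos (by omega : (1 : Int) + 1 > 1), (ih (i + 1) _).1 0]
          simp only [pvAddBlock]
          rw [if_pos (by omega : i - (1 + 1) ≥ s)]
          have he : i - (1 + 1) = i - 2 := by omega
          rw [he, List.map_cons, hc, pvScanIn_cons, if_neg hSR,
            if_neg (by simp : ¬ (('S' : Char) = 'S' ∧ ('S' :: List.map pvClassOf rest).head? = some 'R'))]
          have h2 : i - 1 + 1 = i := by omega
          rw [h2, pvScanOut_cons, if_neg hSR, List.append_assoc]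
          rfl
      · -- class 'O'
        have hc : pvClassOf t = 'O' := by
          simp [pvClassOf, pvIsRed] at hr ⊢
          simp [pvIsSpace] at hsp
          simp [hr, hsp]
        have hOR : ¬ ('O' : Char) = 'R' := by decide
        refine ⟨fun sc => ?_, fun s hs => ?_, fun s hs => ?_⟩
        · simp only [pvLoopA, hr, hsp, Bool.false_eq_true, if_false, pvAddBlock]
          rw [(ih (i + 1) blocks).1 0, List.map_cons, hc, pvScanOut_cons, if_neg hOR]
        · simp only [pvLoopA, hr, hsp, Bool.false_eq_true, if_false]
          rw [(ih (i + 1) _).1 0]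
          simp only [pvAddBlock]
          rw [if_pos (by omega : i - 1 - 0 ≥ s)]
          have h0 : i - 1 - 0 = i - 1 := by omega
          rw [h0, List.map_cons, hc, pvScanIn_cons, if_neg hOR,
            if_neg (by simp : ¬ (('O' : Char) = 'S' ∧ (List.map pvClassOf rest).head? = some 'R')),
            List.append_assoc]
          rfl
        · simp only [pvLoopA, hr, hsp, Bool.false_eq_true, if_false]
          rw [(ih (i + 1) _).1 0]
          simp only [pvAddBlock]
          rw [if_pos (by omega : i - 1 - 1 ≥ s)]
          have he : i - 1 - 1 = i - 2 := by omega
          rw [he, List.map_cons, hc, pvScanIn_cons, if_neg hSR,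
            if_neg (by simp : ¬ (('S' : Char) = 'S' ∧ ('O' :: List.map pvClassOf rest).head? = some 'R'))]
          have h2 : i - 1 + 1 = i := by omega
          rw [h2, pvScanOut_cons, if_neg hOR, List.append_assoc]
          rfl

-- ===== VERDICT (by name: the statement is the Claim_ definition above) =====
theorem identify_red_blocks_spec : Claim_equal_identify_red_blocks := by
  intro fs _ _
  unfold Spec_identify_red_blocks identify_red_blocks identify_red_blocks_alt
  have h := (pvLoop_inv fs 0 []).1 0
  simpa using h
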